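-- pv_equiv track=rewrite | github.com/maelrx/Zugzwang | zugzwang/core/protocol.py | _unicode_board_from_fen
-- ===== SOURCE A (Python) =====
-- def _unicode_board_from_fen(fen: str) -> str:
--     board_part = fen.split(" ", 1)[0]
--     rows = board_part.split("/")
--     expanded: list[str] = []
--     for row in rows:
--         row_cells: list[str] = []
--         for token in row:
--             if token.isdigit():
--                 row_cells.extend(["."] * int(token))
--             else:
--                 row_cells.append(token)
--         expanded.append(" ".join(row_cells))
--     return "\n".join(expanded)
-- ===== SOURCE B (Python) =====
-- def _unicode_board_from_fen(fen: str) -> str: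
--     out = []
--     first_in_row = True
--     for ch in fen:
--         if ch == " ":
--             break
--         if ch == "/":
--             out.append("\n")
--             first_in_row = True
--         elif ch.isdigit():
--             for _ in range(int(ch)):
--                 if not first_in_row:
--                     out.append(" ")
--                 out.append(".")
--                 first_in_row = False
--         else:
--             if not first_in_row:
--                 out.append(" ")
--             out.append(ch)
--             first_in_row = False
--     return "".join(out)
-- ===== Notes on version B (the rewrite author's own statement) =====
-- stated objective: alternative
-- what changed: Replaces A's pipeline of splitting into a board part and rows, building a per-row cell list and two join passes with a single streaming pass over the raw FEN that emits cell and row separators on the fly via a first-in-row flag and stops at the first blank.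
import Mathlib
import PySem

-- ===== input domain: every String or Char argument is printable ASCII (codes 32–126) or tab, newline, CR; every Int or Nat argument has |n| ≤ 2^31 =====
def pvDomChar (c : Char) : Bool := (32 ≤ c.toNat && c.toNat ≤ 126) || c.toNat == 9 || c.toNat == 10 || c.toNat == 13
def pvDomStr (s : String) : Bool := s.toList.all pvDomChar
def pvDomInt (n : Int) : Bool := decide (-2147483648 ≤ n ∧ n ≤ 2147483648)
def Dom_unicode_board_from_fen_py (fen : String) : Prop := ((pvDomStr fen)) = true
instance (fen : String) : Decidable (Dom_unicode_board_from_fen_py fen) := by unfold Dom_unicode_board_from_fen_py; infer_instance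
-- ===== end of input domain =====

-- B replaces A's split/expand/join pipeline by a single streaming pass emitting separators on the fly (objective: alternative decomposition, same cost).

-- ===== PORT A =====
-- `int(token)` for a char with `token.isdigit()` is exact as `token.toNat - 48` on the ASCII domain.
def unicode_board_from_fen_py (fen : String) : String :=
  let board_part : List Char := ((PySem.Chars.splitMax? fen.toList [' '] 1).getD []).headD []
  let rows : List (List Char) := PySem.Chars.splitOn board_part ['/']
  let expanded : List (List Char) := rows.map (fun row =>
    let row_cells : List (List Char) := row.foldl (fun acc token =>
      if PySem.Chars.isdigit token then acc ++ List.replicate (token.toNat - 48) ['.']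
      else acc ++ [[token]]) []
    PySem.Chars.join [' '] row_cells)
  String.mk (PySem.Chars.join ['\n'] expanded)

-- ===== PORT B =====
-- inner `for _ in range(int(ch))` loop of Source B
def altDots : Nat → Bool → List Char
  | 0, _ => []
  | n + 1, first => (if first then ['.'] else [' ', '.']) ++ altDots n false

-- main character loop of Source B (break at the first space)
def altGo : List Char → Bool → List Char
  | [], _ => []
  | c :: rest, first =>
    if c = ' ' then []
    else if c = '/' then '\n' :: altGo rest true
    else if PySem.Chars.isdigit c then
      let n := c.toNat - 48
      altDots n first ++ altGo rest (first && n == 0)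
    else (if first then [c] else [' ', c]) ++ altGo rest false

def unicode_board_from_fen_py_alt (fen : String) : String :=
  String.mk (altGo fen.toList true)

-- ===== PRECONDITION & SPEC =====
def Spec_unicode_board_from_fen_py (fen : String) (out : String) : Prop := out = unicode_board_from_fen_py_alt fen
instance (fen : String) (out : String) : Decidable (Spec_unicode_board_from_fen_py fen out) := by unfold Spec_unicode_board_from_fen_py; infer_instance

-- ===== CLAIM (what is proved, stated in full; the proofs are below) =====
def Claim_equal_unicode_board_from_fen_py : Prop := ∀ (fen : String), Dom_unicode_board_from_fen_py fen → Spec_unicode_board_from_fen_py fen (unicode_board_from_fen_py fen)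

-- ===== LEMMAS AND PROOFS =====

-- recursive characterisation of splitting on '/'
def splitRec : List Char → List (List Char)
  | [] => [[]]
  | c :: rest =>
    if c = '/' then [] :: splitRec rest
    else (c :: (splitRec rest).headD []) :: (splitRec rest).tail

lemma splitRec_ne_nil (l : List Char) : splitRec l ≠ [] := by
  cases l with
  | nil => simp [splitRec]
  | cons c rest => simp only [splitRec]; split <;> simp

-- the cell list A's inner fold builds
def cells (r : List Char) : List (List Char) :=
  r.flatMap (fun c => if PySem.Chars.isdigit c then List.replicate (c.toNat - 48) ['.'] else [[c]])

lemma join_single_sep (s : Char) (x : List Char) (xs : List (List Char)) :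
    PySem.Chars.join [s] (x :: xs) = x ++ xs.flatMap (fun y => s :: y) := by
  induction xs generalizing x with
  | nil => simp [PySem.Chars.join, List.intercalate]
  | cons y ys ih =>
      simp only [PySem.Chars.join, List.intercalate, List.intersperse] at *
      simp_all

-- splitOn.go characterisation
lemma splitOn_go_eq (fuel : Nat) (l cur : List Char) (acc : List (List Char))
    (h : l.length < fuel) :
    PySem.Chars.splitOn.go ['/'] fuel l cur acc =
      acc.reverse ++ (cur.reverse ++ (splitRec l).headD []) :: (splitRec l).tail := by
  induction fuel generalizing l cur acc with
  | zero => omega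
  | succ f ih =>
    cases l with
    | nil => simp [PySem.Chars.splitOn.go, splitRec]
    | cons c rest =>
      by_cases hc : c = '/'
      · subst hc
        have hpre : (['/'] : List Char).isPrefixOf ('/' :: rest) = true := by
          simp [List.isPrefixOf]
        rw [PySem.Chars.splitOn.go]
        simp only [hpre, if_pos]
        rw [show List.drop (['/'] : List Char).length ('/' :: rest) = rest from rfl]
        rw [ih rest [] (cur.reverse :: acc) (by simpa using Nat.lt_of_succ_lt_succ h)]
        obtain ⟨hd, tl, hsp⟩ : ∃ hd tl, splitRec rest = hd :: tl := by
          cases hh : splitRec rest with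
          | nil => exact absurd hh (splitRec_ne_nil rest)
          | cons a b => exact ⟨a, b, rfl⟩
        simp [splitRec, hsp]
      · have hpre : (['/'] : List Char).isPrefixOf (c :: rest) = false := by
          simp [List.isPrefixOf]
          exact fun h => hc h.symm
        rw [PySem.Chars.splitOn.go]
        simp only [hpre]
        rw [if_neg (by simp)]
        rw [ih rest (c :: cur) acc (by simpa using Nat.lt_of_succ_lt_succ h)]
        simp [splitRec, hc]

lemma splitOn_eq_splitRec (l : List Char) :
    PySem.Chars.splitOn l ['/'] = (splitRec l).headD [] :: (splitRec l).tail := by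
  rw [PySem.Chars.splitOn, splitOn_go_eq (l.length + 1) l [] [] (by omega)]
  simp

-- splitOnMax.go with maxsplit already exhausted
lemma splitOnMax_go_zero (fuel : Nat) (l : List Char) (acc : List (List Char)) :
    PySem.Chars.splitOnMax.go [' '] fuel 0 l [] acc = acc.reverse ++ [l] := by
  cases fuel with
  | zero => simp [PySem.Chars.splitOnMax.go]
  | succ f =>
    cases l with
    | nil => simp [PySem.Chars.splitOnMax.go]
    | cons c rest => simp [PySem.Chars.splitOnMax.go]

-- splitOnMax.go with maxsplit 1: the first piece is the prefix before the first space
lemma splitOnMax_go_one (fuel : Nat) (l cur : List Char) (acc : List (List Char))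
    (h : l.length < fuel) :
    PySem.Chars.splitOnMax.go [' '] fuel 1 l cur acc =
      acc.reverse ++ (cur.reverse ++ l.takeWhile (· ≠ ' ')) ::
        (if ' ' ∈ l then [(l.dropWhile (· ≠ ' ')).tail] else []) := by
  induction fuel generalizing l cur acc with
  | zero => omega
  | succ f ih =>
    cases l with
    | nil => simp [PySem.Chars.splitOnMax.go]
    | cons c rest =>
      by_cases hc : c = ' '
      · subst hc
        have hpre : ([' '] : List Char).isPrefixOf (' ' :: rest) = true := by
          simp [List.isPrefixOf]
        rw [PySem.Chars.splitOnMax.go]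
        simp only [hpre, if_pos, if_neg (by omega : ¬ (1 : Nat) = 0)]
        rw [show (1 : Nat) - 1 = 0 from rfl]
        rw [show List.drop ([' '] : List Char).length (' ' :: rest) = rest from rfl]
        rw [splitOnMax_go_zero]
        simp [List.takeWhile, List.dropWhile]
      · have hpre : ([' '] : List Char).isPrefixOf (c :: rest) = false := by
          simp [List.isPrefixOf]
          exact fun h => hc h.symm
        rw [PySem.Chars.splitOnMax.go]
        simp only [hpre, if_neg (by omega : ¬ (1 : Nat) = 0)]
        rw [if_neg (by simp)]
        rw [ih rest (c :: cur) acc (by simpa using Nat.lt_of_succ_lt_succ h)]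
        have hc' : ¬ (' ' = c) := fun h => hc h.symm
        simp [List.takeWhile, List.dropWhile, hc, hc']

lemma board_part_eq (cs : List Char) :
    ((PySem.Chars.splitMax? cs [' '] 1).getD []).headD [] = cs.takeWhile (· ≠ ' ') := by
  rw [PySem.Chars.splitMax?]
  simp only [List.isEmpty, if_neg]
  rw [PySem.Chars.splitOnMax]
  rw [if_neg (by omega : ¬ (1 : Int) < 0)]
  rw [show ((1 : Int)).toNat = 1 from rfl]
  rw [splitOnMax_go_one (cs.length + 1) cs [] [] (by omega)]
  simp

-- A's per-row join, and the \n-joined output, in flatMap form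
def rowsJ (l : List Char) : List (List Char) :=
  (splitRec l).map (fun r => PySem.Chars.join [' '] (cells r))

def aOutL (l : List Char) : List Char := PySem.Chars.join ['\n'] (rowsJ l)

def aOutF (l : List Char) : List Char :=
  (cells ((splitRec l).headD [])).flatMap (fun cell => ' ' :: cell) ++
    ((rowsJ l).tail).flatMap (fun r => '\n' :: r)

lemma aOutL_flat (l : List Char) :
    aOutL l = PySem.Chars.join [' '] (cells ((splitRec l).headD [])) ++
      ((rowsJ l).tail).flatMap (fun r => '\n' :: r) := by
  obtain ⟨hd, tl, hsp⟩ : ∃ hd tl, splitRec l = hd :: tl := by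
    cases hh : splitRec l with
    | nil => exact absurd hh (splitRec_ne_nil l)
    | cons a b => exact ⟨a, b, rfl⟩
  simp [aOutL, rowsJ, hsp, join_single_sep]

lemma altDots_false (n : Nat) :
    altDots n false = (List.replicate n (['.'] : List Char)).flatMap (fun cell => ' ' :: cell) := by
  induction n with
  | zero => simp [altDots]
  | succ m ih => simp [altDots, List.replicate, ih]

lemma join_replicate_append_true (n : Nat) (rest : List (List Char)) (hn : 0 < n) :
    PySem.Chars.join [' '] (List.replicate n (['.'] : List Char) ++ rest) =
      '.' :: ((List.replicate (n - 1) (['.'] : List Char) ++ rest).flatMap (fun y => ' ' :: y)) := by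
  cases n with
  | zero => omega
  | succ m => simp [List.replicate, join_single_sep]

-- the core invariant: B's streaming pass computes A's join-of-rows output
lemma altGo_spec (l : List Char) (hsp : ' ' ∉ l) :
    altGo l true = aOutL l ∧ altGo l false = aOutF l := by
  induction l with
  | nil => simp [altGo, aOutL, rowsJ, splitRec, cells, aOutF, PySem.Chars.join, List.intercalate]
  | cons c rest ih =>
    have hc : c ≠ ' ' := fun h => hsp (h ▸ List.mem_cons_self ..)
    have hrest : ' ' ∉ rest := fun h => hsp (List.mem_cons_of_mem _ h)
    obtain ⟨ihT, ihF⟩ := ih hrest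
    obtain ⟨hd, tl, hspl⟩ : ∃ hd tl, splitRec rest = hd :: tl := by
      cases hh : splitRec rest with
      | nil => exact absurd hh (splitRec_ne_nil rest)
      | cons a b => exact ⟨a, b, rfl⟩
    by_cases hsl : c = '/'
    · subst hsl
      have hout : aOutL ('/' :: rest) = '\n' :: aOutL rest := by
        simp [aOutL, rowsJ, splitRec, hspl, cells, PySem.Chars.join, List.intercalate,
          join_single_sep]
      have houtF : aOutF ('/' :: rest) = '\n' :: aOutL rest := by
        simp [aOutF, aOutL, rowsJ, splitRec, hspl, cells, join_single_sep]
      constructor <;>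
        simp [altGo, hout, houtF, ihT, if_neg (by decide : ¬ ('/' : Char) = ' ')]
    · by_cases hdig : PySem.Chars.isdigit c = true
      · have hstep : ∀ first, altGo (c :: rest) first =
            altDots (c.toNat - 48) first ++ altGo rest (first && ((c.toNat - 48) == 0)) := by
          intro first; simp [altGo, hc, hsl, hdig]
        have hcells : cells (c :: ((splitRec rest).headD [])) =
            List.replicate (c.toNat - 48) ['.'] ++ cells ((splitRec rest).headD []) := by
          simp [cells, hdig]
        have htails : (rowsJ (c :: rest)).tail = (rowsJ rest).tail := by
          simp [rowsJ, splitRec, hsl, hspl]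
        have hhead : (splitRec (c :: rest)).headD [] = c :: ((splitRec rest).headD []) := by
          simp [splitRec, hsl, hspl]
        by_cases hn0 : c.toNat - 48 = 0
        · have hrepl : List.replicate (c.toNat - 48) (['.'] : List Char) = [] := by simp [hn0]
          have hb : ((c.toNat - 48) == 0) = true := by simp [hn0]
          constructor
          · rw [hstep true, aOutL_flat, hhead, hcells, hrepl, hn0]
            simp [altDots, ihT, aOutL_flat, htails]
          · rw [hstep false,
              show aOutF (c :: rest) =
                (cells ((splitRec (c :: rest)).headD [])).flatMap (fun cell => ' ' :: cell) ++
                  ((rowsJ (c :: rest)).tail).flatMap (fun r => '\n' :: r) from rfl,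
              hhead, hcells, hrepl, hn0]
            simp [altDots, ihF, aOutF, htails]
        · have hpos : 0 < c.toNat - 48 := Nat.pos_of_ne_zero hn0
          have hb : ((c.toNat - 48) == 0) = false := by simp [hn0]
          have hdt : altDots (c.toNat - 48) true = '.' :: altDots (c.toNat - 48 - 1) false := by
            cases hnn : c.toNat - 48 with
            | zero => omega
            | succ m => simp [altDots]
          constructor
          · rw [hstep true, aOutL_flat, hhead, hcells,
              join_replicate_append_true _ _ hpos, hb, hdt, altDots_false]
            simp [ihF, aOutF, htails, List.flatMap_append]
          · rw [hstep false,
              show aOutF (c :: rest) =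
                (cells ((splitRec (c :: rest)).headD [])).flatMap (fun cell => ' ' :: cell) ++
                  ((rowsJ (c :: rest)).tail).flatMap (fun r => '\n' :: r) from rfl,
              hhead, hcells, altDots_false, hb]
            simp [ihF, aOutF, htails, List.flatMap_append]
      · have hcells : cells (c :: ((splitRec rest).headD [])) =
            [c] :: cells ((splitRec rest).headD []) := by
          simp [cells, hdig]
        have htails : (rowsJ (c :: rest)).tail = (rowsJ rest).tail := by
          simp [rowsJ, splitRec, hsl, hspl]
        have hhead : (splitRec (c :: rest)).headD [] = c :: ((splitRec rest).headD []) := by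
          simp [splitRec, hsl, hspl]
        constructor
        · rw [show altGo (c :: rest) true = [c] ++ altGo rest false by
              simp [altGo, hc, hsl, hdig]]
          rw [aOutL_flat, hhead, hcells, join_single_sep]
          simp [ihF, aOutF, htails]
        · rw [show altGo (c :: rest) false = [' ', c] ++ altGo rest false by
              simp [altGo, hc, hsl, hdig]]
          rw [show aOutF (c :: rest) =
              (cells ((splitRec (c :: rest)).headD [])).flatMap (fun cell => ' ' :: cell) ++
                ((rowsJ (c :: rest)).tail).flatMap (fun r => '\n' :: r) from rfl]
          rw [hhead, hcells]
          simp [ihF, aOutF, htails]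

-- B ignores everything from the first space on
lemma altGo_takeWhile (l : List Char) (first : Bool) :
    altGo l first = altGo (l.takeWhile (· ≠ ' ')) first := by
  induction l generalizing first with
  | nil => simp
  | cons c rest ih =>
    by_cases hc : c = ' '
    · subst hc; simp [altGo, List.takeWhile]
    · simp only [altGo, List.takeWhile, hc]
      simp only [if_neg hc, decide_not, decide_eq_true_eq]
      by_cases hsl : c = '/'
      · subst hsl
        simp [altGo, ih, if_neg (by decide : ¬ ('/' : Char) = ' ')]
      · by_cases hdig : PySem.Chars.isdigit c = true <;>
          simp [altGo, hc, hsl, hdig, ih]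

-- A's whole pipeline equals aOutL of the board part
lemma portA_eq (fen : String) :
    unicode_board_from_fen_py fen = String.mk (aOutL (fen.toList.takeWhile (· ≠ ' '))) := by
  rw [unicode_board_from_fen_py]
  have hfun : (fun (acc : List (List Char)) token =>
      if PySem.Chars.isdigit token then acc ++ List.replicate (token.toNat - 48) ['.']
      else acc ++ [[token]]) = (fun acc token => acc ++
        (if PySem.Chars.isdigit token then List.replicate (token.toNat - 48) ['.']
         else [[token]])) := by
    funext acc token; split <;> rfl
  rw [hfun, board_part_eq, splitOn_eq_splitRec]
  have hsp : (splitRec (fen.toList.takeWhile (· ≠ ' '))).headD [] ::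
      (splitRec (fen.toList.takeWhile (· ≠ ' '))).tail =
      splitRec (fen.toList.takeWhile (· ≠ ' ')) := by
    cases hh : splitRec (fen.toList.takeWhile (· ≠ ' ')) with
    | nil => exact absurd hh (splitRec_ne_nil _)
    | cons a b => rfl
  rw [hsp]
  congr 1
  rw [aOutL, rowsJ]
  apply congrArg
  apply List.map_congr_left
  intro r _
  rw [PySem.List.foldl_append_eq_flatMap]
  rfl

-- ===== VERDICT (by name: the statement is the Claim_ definition above) =====
theorem unicode_board_from_fen_py_spec : Claim_equal_unicode_board_from_fen_py := by
  intro fen _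
  unfold Spec_unicode_board_from_fen_py
  rw [portA_eq, unicode_board_from_fen_py_alt, altGo_takeWhile]
  congr 1
  refine ((altGo_spec _ ?_).1).symm
  intro hmem
  simpa using List.mem_takeWhile_imp hmem
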